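-- pv_equiv track=rewrite | github.com/facebookresearch/Exact-Byte-Level-Probabilities-from-Tokenized-LMs | src/string_processor/string_helper.py | whitespace_split
-- ===== SOURCE A (Python) =====
-- def whitespace_split(white_space, raw_str):
--     """
--     Check if the string contains a whitespace
--     appearing after a word. Then split raw_str
--     into 2 parts where cond_str is the prefix
--     before the last white space.
--     """
--     break_point = -1
--     for i in range(1, len(raw_str)):
--         if raw_str[i] == white_space and raw_str[i - 1] != white_space:
--             break_point = i
--
--     assert break_point > 0, "invalid string"
--     cond_str = raw_str[:break_point]
--     query_str = raw_str[break_point:]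
--     return cond_str, query_str
-- ===== SOURCE B (Python) =====
-- def whitespace_split(white_space, raw_str):
--     """
--     Build a 0/1 indicator mask of the string ('1' where the char equals
--     white_space) and locate the last word boundary as the last occurrence
--     of the two-char pattern '01' in the mask; split raw_str there.
--     """
--     mask = ''.join('1' if ch == white_space else '0' for ch in raw_str)
--     break_point = mask.rfind('01') + 1
--     assert break_point > 0, "invalid string"
--     return raw_str[:break_point], raw_str[break_point:]
-- ===== Notes on version B (the rewrite author's own statement) =====
-- stated objective: alternative
-- what changed: A scans indices keeping a break_point accumulator testing adjacent characters; B first builds a 0/1 indicator mask of the string and then finds the boundary as the last occurrence of the substring '01' in the mask via str.rfind.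
import Mathlib
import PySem

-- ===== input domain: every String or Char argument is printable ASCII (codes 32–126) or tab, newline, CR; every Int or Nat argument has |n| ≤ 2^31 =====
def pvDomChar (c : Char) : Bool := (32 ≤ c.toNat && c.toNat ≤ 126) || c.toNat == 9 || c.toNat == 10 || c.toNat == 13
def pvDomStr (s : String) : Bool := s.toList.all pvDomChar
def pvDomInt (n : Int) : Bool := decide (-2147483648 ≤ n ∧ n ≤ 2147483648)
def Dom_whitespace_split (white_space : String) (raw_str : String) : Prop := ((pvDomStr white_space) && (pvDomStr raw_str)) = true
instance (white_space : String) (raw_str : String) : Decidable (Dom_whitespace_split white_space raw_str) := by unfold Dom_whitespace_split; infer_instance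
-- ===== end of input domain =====

-- B replaces A's accumulator scan over adjacent characters by an indicator mask
-- plus a substring search for '01'; the return value is proved identical on Pre_.

-- ===== PORT A =====
-- forward loop over range(1, len(raw_str)) remembering the last boundary index;
-- Python's raw_str[i] == white_space is the one-char-string comparison
-- white_space.toList = [c]; the indices are always in range so pyGetD is exact.
def whitespace_split (white_space : String) (raw_str : String) : String × String :=
  let cs := raw_str.toList
  let break_point : Int :=
    (PySem.List.pyRange 1 (cs.length : Int) 1).foldl
      (fun bp i =>
        if white_space.toList = [PySem.List.pyGetD cs i ' '] ∧
           white_space.toList ≠ [PySem.List.pyGetD cs (i - 1) ' '] then i else bp)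
      (-1)
  if 0 < break_point then
    (String.ofList (PySem.List.slice cs none (some break_point)),
     String.ofList (PySem.List.slice cs (some break_point) none))
  else ("", "")  -- the Python assert fires here: outside Pre_

-- ===== PORT B =====
-- mask = ''.join('1' if ch == white_space else '0' for ch in raw_str);
-- break_point = mask.rfind('01') + 1; then the same slicing.
def whitespace_split_alt (white_space : String) (raw_str : String) : String × String :=
  let cs := raw_str.toList
  let mask : List Char := cs.map (fun ch => if white_space.toList = [ch] then '1' else '0')
  let break_point : Int := PySem.Chars.rfind mask ['0', '1'] + 1
  if 0 < break_point then
    (String.ofList (PySem.List.slice cs none (some break_point)),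
     String.ofList (PySem.List.slice cs (some break_point) none))
  else ("", "")  -- the Python assert fires here: outside Pre_

-- ===== PRECONDITION & SPEC =====
-- Pre_ excludes exactly the inputs on which A's assert (and B's assert) fires:
-- strings with no whitespace boundary (in particular any multi-char white_space).
def Pre_whitespace_split (white_space : String) (raw_str : String) : Prop :=
  ∃ i ∈ List.range raw_str.toList.length, 1 ≤ i ∧
    white_space.toList = [raw_str.toList.getD i ' '] ∧
    white_space.toList ≠ [raw_str.toList.getD (i - 1) ' ']
instance (white_space : String) (raw_str : String) : Decidable (Pre_whitespace_split white_space raw_str) := by unfold Pre_whitespace_split; infer_instance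
def pvWitness_whitespace_split : String × String := (" ", "hi there")

def Spec_whitespace_split (white_space : String) (raw_str : String) (out : String × String) : Prop := out = whitespace_split_alt white_space raw_str
instance (white_space : String) (raw_str : String) (out : String × String) : Decidable (Spec_whitespace_split white_space raw_str out) := by unfold Spec_whitespace_split; infer_instance

-- ===== CLAIM (what is proved, stated in full; the proofs are below) =====
def Claim_equal_whitespace_split : Prop := ∀ (white_space : String) (raw_str : String), Dom_whitespace_split white_space raw_str → Pre_whitespace_split white_space raw_str → Spec_whitespace_split white_space raw_str (whitespace_split white_space raw_str)

-- ===== LEMMAS AND PROOFS =====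

-- proof-only helper: the (unique) last boundary index, found by descending search
def wsGo (white_space : String) (cs : List Char) : Nat → Option Nat
  | 0 => none
  | m + 1 =>
    if white_space.toList = [cs.getD (m + 1) ' '] ∧
       white_space.toList ≠ [cs.getD m ' '] then some (m + 1)
    else wsGo white_space cs m

-- A's accumulator fold over range m (shifted by 1) computes the same index as wsGo
theorem foldl_eq_wsGo (ws : String) (cs : List Char) (m : Nat) :
    (List.range m).foldl
      (fun (bp : Int) k =>
        if ws.toList = [cs.getD (k + 1) ' '] ∧ ws.toList ≠ [cs.getD k ' '] then
          ((k : Int) + 1) else bp) (-1)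
    = match wsGo ws cs m with
      | some i => (i : Int)
      | none => -1 := by
  induction m with
  | zero => simp [wsGo]
  | succ m ih =>
    rw [List.range_succ, List.foldl_append]
    simp only [List.foldl_cons, List.foldl_nil, wsGo]
    split_ifs with h
    · simp
    · exact ih

theorem wsGo_pos (ws : String) (cs : List Char) (m : Nat) (i : Nat)
    (h : wsGo ws cs m = some i) : 1 ≤ i := by
  induction m with
  | zero => simp [wsGo] at h
  | succ m ih =>
    rw [wsGo] at h
    split_ifs at h with hc
    · injection h with h; omega
    · exact ih h

-- ['0','1'] as a prefix of a cons-cons list, elementwise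
theorem isPrefixOf01 (x y : Char) (r : List Char) :
    (['0', '1'].isPrefixOf (x :: y :: r) = true) ↔ (x = '0' ∧ y = '1') := by
  simp only [List.isPrefixOf_iff_prefix, List.cons_prefix_cons, List.nil_prefix, and_true]
  constructor <;> rintro ⟨a, b⟩ <;> exact ⟨a.symm, b.symm⟩

-- '01' is a prefix of the mask dropped at j iff the boundary condition holds at j+1
theorem prefix01_iff (ws : String) (cs : List Char) (j : Nat) (hj : j + 2 ≤ cs.length) :
    (['0', '1'].isPrefixOf
      ((cs.map (fun ch => if ws.toList = [ch] then '1' else '0')).drop j) = true)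
    ↔ (ws.toList = [cs.getD (j + 1) ' '] ∧ ws.toList ≠ [cs.getD j ' ']) := by
  have h1 : j < cs.length := by omega
  have h2 : j + 1 < cs.length := by omega
  have hdrop : cs.drop j = cs[j] :: cs[j + 1] :: cs.drop (j + 2) := by
    rw [List.drop_eq_getElem_cons h1, List.drop_eq_getElem_cons h2]
  rw [← List.map_drop, hdrop, List.map_cons, List.map_cons, isPrefixOf01,
      List.getD_eq_getElem cs ' ' h2, List.getD_eq_getElem cs ' ' h1]
  by_cases hA : ws.toList = [cs[j + 1]] <;> by_cases hB : ws.toList = [cs[j]] <;>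
    simp [hA, hB]

-- ['0','1'] is never a prefix of a list with fewer than two elements
theorem not_prefix01_short (l : List Char) (h : l.length < 2) :
    ['0', '1'].isPrefixOf l = false := by
  match l with
  | [] => rfl
  | [a] => simp [List.isPrefixOf]
  | a :: b :: t => simp at h

-- B's rfind.go over the mask computes the same index as wsGo (shifted by 1)
theorem rfindGo_eq_wsGo (ws : String) (cs : List Char) (m : Nat) (hm : m + 2 ≤ cs.length) :
    PySem.Chars.rfind.go
      (cs.map (fun ch => if ws.toList = [ch] then '1' else '0')) ['0', '1'] m
    = match wsGo ws cs (m + 1) with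
      | some i => (i : Int) - 1
      | none => -1 := by
  induction m with
  | zero =>
    rw [PySem.Chars.rfind.go, wsGo]
    have := prefix01_iff ws cs 0 hm
    simp only [List.drop_zero] at this
    split_ifs with h1 h2 h2'
    · simp
    · exact absurd (this.mp h1) h2
    · exact absurd (this.mpr h2') (by simp [h1])
    · simp [wsGo]
  | succ m ih =>
    rw [PySem.Chars.rfind.go]
    conv_rhs => rw [wsGo]
    have := prefix01_iff ws cs (m + 1) hm
    split_ifs with h1 h2 h2'
    · push_cast
      ring
    · exact absurd (this.mp h1) h2
    · exact absurd (this.mpr h2') (by simp [h1])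
    · exact ih (by omega)

-- ===== VERDICT (by name: the statement is the Claim_ definition above) =====
theorem whitespace_split_spec : Claim_equal_whitespace_split := by
  intro ws raw _ hpre
  unfold Spec_whitespace_split whitespace_split whitespace_split_alt
  set cs := raw.toList with hcs
  -- Pre_ gives a boundary, hence cs.length ≥ 2
  obtain ⟨i0, hi0mem, hi01, _, _⟩ := hpre
  rw [List.mem_range] at hi0mem
  have hn2 : 2 ≤ cs.length := by rw [hcs]; omega
  -- A's fold over pyRange rewritten into the shifted fold over List.range
  have hrange : PySem.List.pyRange 1 (cs.length : Int) 1
      = (List.range (cs.length - 1)).map (fun (k : Nat) => 1 + (k : Int)) := by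
    simpa using PySem.List.pyRange_one 1 (cs.length : Int)
  simp only [hrange, List.foldl_map]
  have hfun : (fun (bp : Int) (k : Nat) =>
      if ws.toList = [PySem.List.pyGetD cs (1 + (k : Int)) ' '] ∧
         ws.toList ≠ [PySem.List.pyGetD cs (1 + (k : Int) - 1) ' '] then 1 + (k : Int) else bp)
      = (fun (bp : Int) (k : Nat) =>
      if ws.toList = [cs.getD (k + 1) ' '] ∧ ws.toList ≠ [cs.getD k ' '] then
        ((k : Int) + 1) else bp) := by
    funext bp k
    have h1 : (1 + (k : Int)) = ((k + 1 : Nat) : Int) := by push_cast; ring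
    have h2 : ((k + 1 : Nat) : Int) - 1 = ((k : Nat) : Int) := by push_cast; ring
    rw [h1, h2, PySem.List.pyGetD_natCast, PySem.List.pyGetD_natCast]
    split_ifs <;> simp
  simp only [hfun, foldl_eq_wsGo ws cs (cs.length - 1)]
  -- B's rfind: peel the two out-of-range top indices, then apply the bridge
  obtain ⟨k, hk⟩ : ∃ k, cs.length = k + 2 := ⟨cs.length - 2, by omega⟩
  have hmlen : (cs.map (fun ch => if ws.toList = [ch] then '1' else '0')).length = k + 2 := by
    simp [hk]
  have hrf : PySem.Chars.rfind
      (cs.map (fun ch => if ws.toList = [ch] then '1' else '0')) ['0', '1']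
      = match wsGo ws cs (k + 1) with
        | some i => (i : Int) - 1
        | none => -1 := by
    rw [PySem.Chars.rfind, hmlen]
    rw [PySem.Chars.rfind.go]
    rw [not_prefix01_short _ (by simp [hmlen])]
    simp only [Bool.false_eq_true, if_false]
    rw [PySem.Chars.rfind.go]
    rw [not_prefix01_short _ (by simp [hmlen])]
    simp only [Bool.false_eq_true, if_false]
    exact rfindGo_eq_wsGo ws cs k (by omega)
  have hk1 : cs.length - 1 = k + 1 := by omega
  rw [hk1, hrf]
  cases hgo : wsGo ws cs (k + 1) with
  | none => simp
  | some i =>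
    have hi1 : 1 ≤ i := wsGo_pos ws cs _ i hgo
    have hbp : (i : Int) - 1 + 1 = (i : Int) := by ring
    rw [hbp]
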